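-- pv_equiv track=rewrite | github.com/kylindreagan/Programming-Team | kattis/JuniorYear/chessqueens.py | count_queens_square
-- ===== SOURCE A (Python) =====
-- def count_queens_square(N: int) -> int:
--     rowscols = (2*(N-1)) * N ** 2
--     current_square_size = (N+1) // 2
--     diagonals = 0
--     for i in range(current_square_size):
--         if i == current_square_size-1 and N % 2 == 1:
--              diagonals += (N - 1 + 2 * i)
--         else:
--             diagonals += (N - 1 + 2 * i) * (N - 1 - 2 * i) * 4
--     return rowscols + diagonals
-- ===== SOURCE B (Python) =====
-- def count_queens_square(N: int) -> int:
--     rowscols = (2*(N-1)) * N ** 2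
--     diagonals = 2*N*(N-1)*(2*N-1)//3 if N > 0 else 0
--     return rowscols + diagonals
-- ===== Notes on version B (the rewrite author's own statement) =====
-- stated objective: faster
-- what changed: Replaced A's linear loop over diagonal lengths by a closed-form cubic polynomial (an exact division by three, derived from the sum-of-squares formula) for the diagonal pair count, making the whole function constant-time.
import Mathlib
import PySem

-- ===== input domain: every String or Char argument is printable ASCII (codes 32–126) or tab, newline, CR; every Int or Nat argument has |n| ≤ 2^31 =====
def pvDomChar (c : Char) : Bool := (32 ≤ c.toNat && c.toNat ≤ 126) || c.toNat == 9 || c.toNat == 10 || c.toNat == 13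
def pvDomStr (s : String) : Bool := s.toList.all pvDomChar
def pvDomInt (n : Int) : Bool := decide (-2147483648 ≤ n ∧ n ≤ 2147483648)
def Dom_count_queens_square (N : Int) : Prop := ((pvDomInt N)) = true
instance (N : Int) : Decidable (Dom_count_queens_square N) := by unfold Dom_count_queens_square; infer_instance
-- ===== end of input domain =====

-- B replaces A's linear loop over diagonal lengths by a closed-form cubic polynomial divided exactly by three (objective: faster).
-- ===== PORT A =====
def count_queens_square (N : Int) : Int :=
  let rowscols := (2 * (N - 1)) * N ^ 2
  let current_square_size := PySem.Int.floordiv (N + 1) 2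
  let diagonals := (PySem.List.pyRange 0 current_square_size 1).foldl
    (fun diagonals i =>
      if i == current_square_size - 1 && PySem.Int.mod N 2 == 1 then
        diagonals + (N - 1 + 2 * i)
      else
        diagonals + (N - 1 + 2 * i) * (N - 1 - 2 * i) * 4) 0
  rowscols + diagonals

-- ===== PORT B =====
def count_queens_square_alt (N : Int) : Int :=
  let rowscols := (2 * (N - 1)) * N ^ 2
  let diagonals := if 0 < N then PySem.Int.floordiv (2 * N * (N - 1) * (2 * N - 1)) 3 else 0
  rowscols + diagonals

-- ===== PRECONDITION & SPEC =====
def Spec_count_queens_square (N : Int) (out : Int) : Prop := out = count_queens_square_alt N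
instance (N : Int) (out : Int) : Decidable (Spec_count_queens_square N out) := by unfold Spec_count_queens_square; infer_instance

-- ===== CLAIM (what is proved, stated in full; the proofs are below) =====
def Claim_equal_count_queens_square : Prop := ∀ (N : Int), Dom_count_queens_square N → Spec_count_queens_square N (count_queens_square N)

-- ===== LEMMAS AND PROOFS =====

-- The loop body of A, with the threshold c = current_square_size - 1 abstracted out.
def pvStep (N c : Int) (d i : Int) : Int :=
  if i == c && PySem.Int.mod N 2 == 1 then d + (N - 1 + 2 * i)
  else d + (N - 1 + 2 * i) * (N - 1 - 2 * i) * 4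

-- Sum of the generic (non-special) terms over range(k), when the special branch never fires.
theorem pvSum (N c : Int) (k : Nat) (h : (k : Int) ≤ c ∨ PySem.Int.mod N 2 ≠ 1) :
    3 * ((PySem.List.pyRange 0 (k : Int) 1).foldl (pvStep N c) 0)
      = 12 * (k : Int) * (N - 1) ^ 2 - 8 * (2 * (k : Int) ^ 3 - 3 * (k : Int) ^ 2 + (k : Int)) := by
  induction k with
  | zero => simp [PySem.List.pyRange_one_eq_nil]
  | succ k ih =>
      have hk : ((k + 1 : Nat) : Int) = (k : Int) + 1 := by push_cast; ring
      rw [hk, PySem.List.pyRange_one_succ_right (by positivity), List.foldl_append]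
      have hbranch : pvStep N c ((PySem.List.pyRange 0 (k : Int) 1).foldl (pvStep N c) 0) (k : Int)
          = ((PySem.List.pyRange 0 (k : Int) 1).foldl (pvStep N c) 0)
              + (N - 1 + 2 * (k : Int)) * (N - 1 - 2 * (k : Int)) * 4 := by
        unfold pvStep
        have hcond : (((k : Int) == c) && (PySem.Int.mod N 2 == 1)) = false := by
          rcases h with h | h
          · have hkc : ((k : Int) == c) = false := by
              simp only [beq_eq_false_iff_ne, ne_eq]; push_cast at h; omega
            rw [hkc, Bool.false_and]
          · have hmc : (PySem.Int.mod N 2 == 1) = false := by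
              simpa using h
            rw [hmc, Bool.and_false]
        rw [hcond]
        simp
      simp only [List.foldl_cons, List.foldl_nil]
      rw [hbranch]
      have ih' := ih (h.imp (fun hle => by push_cast at hle ⊢; omega) id)
      linear_combination ih'

theorem pvAlt_of_three_mul (N d : Int) (h : 3 * d = 2 * N * (N - 1) * (2 * N - 1)) :
    PySem.Int.floordiv (2 * N * (N - 1) * (2 * N - 1)) 3 = d := by
  rw [PySem.Int.floordiv_eq_iff_of_pos (by norm_num)]
  omega

-- ===== VERDICT (by name: the statement is the Claim_ definition above) =====
theorem count_queens_square_spec : Claim_equal_count_queens_square := by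
  intro N _
  show count_queens_square N = count_queens_square_alt N
  unfold count_queens_square count_queens_square_alt
  simp only []
  by_cases hN : 0 < N
  · rw [if_pos hN]
    rcases Int.even_or_odd N with ⟨m, hm⟩ | ⟨m, hm⟩
    · -- N = 2m, m ≥ 1: the special branch never fires (N even)
      have hmod : PySem.Int.mod N 2 = 0 := by
        rw [PySem.Int.mod_eq_emod_of_pos (by norm_num)]; omega
      have hm1 : 0 < m := by omega
      obtain ⟨k, hk⟩ : ∃ k : Nat, m = (k : Int) := ⟨m.toNat, by omega⟩
      have hfd : PySem.Int.floordiv (N + 1) 2 = (k : Int) := by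
        rw [PySem.Int.floordiv_eq_iff_of_pos (by norm_num)]; omega
      rw [hfd]
      have hsum := pvSum N ((k : Int) - 1) k (Or.inr (by rw [hmod]; norm_num))
      have h3 : 3 * ((PySem.List.pyRange 0 (k : Int) 1).foldl (pvStep N ((k : Int) - 1)) 0)
          = 2 * N * (N - 1) * (2 * N - 1) := by
        rw [hsum]
        have hNk : N = 2 * (k : Int) := by omega
        rw [hNk]; ring
      rw [show (fun (diagonals i : Int) =>
            if i == (k : Int) - 1 && PySem.Int.mod N 2 == 1 then diagonals + (N - 1 + 2 * i)
            else diagonals + (N - 1 + 2 * i) * (N - 1 - 2 * i) * 4) = pvStep N ((k : Int) - 1) from rfl]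
      rw [pvAlt_of_three_mul N _ h3]
    · -- N = 2m+1, m ≥ 0: the special branch fires exactly at the last iteration i = m
      have hmod : PySem.Int.mod N 2 = 1 := by
        rw [PySem.Int.mod_eq_emod_of_pos (by norm_num)]; omega
      obtain ⟨k, hk⟩ : ∃ k : Nat, m = (k : Int) := ⟨m.toNat, by omega⟩
      have hfd : PySem.Int.floordiv (N + 1) 2 = (k : Int) + 1 := by
        rw [PySem.Int.floordiv_eq_iff_of_pos (by norm_num)]; omega
      rw [hfd]
      rw [show (fun (diagonals i : Int) =>
            if i == (k : Int) + 1 - 1 && PySem.Int.mod N 2 == 1 then diagonals + (N - 1 + 2 * i)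
            else diagonals + (N - 1 + 2 * i) * (N - 1 - 2 * i) * 4) = pvStep N ((k : Int) + 1 - 1) from rfl]
      rw [PySem.List.pyRange_one_succ_right (by positivity), List.foldl_append]
      have hlast : pvStep N ((k : Int) + 1 - 1)
            ((PySem.List.pyRange 0 (k : Int) 1).foldl (pvStep N ((k : Int) + 1 - 1)) 0) (k : Int)
          = ((PySem.List.pyRange 0 (k : Int) 1).foldl (pvStep N ((k : Int) + 1 - 1)) 0)
              + (N - 1 + 2 * (k : Int)) := by
        unfold pvStep
        have hcond : (((k : Int) == (k : Int) + 1 - 1) && (PySem.Int.mod N 2 == 1)) = true := by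
          rw [hmod]; simp
        rw [hcond]
        simp
      simp only [List.foldl_cons, List.foldl_nil]
      rw [hlast]
      have hsum := pvSum N ((k : Int) + 1 - 1) k (Or.inl (by omega))
      have h3 : 3 * (((PySem.List.pyRange 0 (k : Int) 1).foldl (pvStep N ((k : Int) + 1 - 1)) 0)
            + (N - 1 + 2 * (k : Int))) = 2 * N * (N - 1) * (2 * N - 1) := by
        have hNk : N = 2 * (k : Int) + 1 := by omega
        rw [mul_add, hsum, hNk]; ring
      rw [pvAlt_of_three_mul N _ h3]
  · rw [if_neg hN]
    have hnil : PySem.List.pyRange 0 (PySem.Int.floordiv (N + 1) 2) 1 = [] := by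
      apply PySem.List.pyRange_one_eq_nil
      have : PySem.Int.floordiv (N + 1) 2 < 1 := by
        rw [PySem.Int.floordiv_lt_iff_lt_mul (by norm_num)]; omega
      omega
    rw [hnil]
    simp
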